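-- pv_equiv track=rewrite | github.com/CloudEngineHub/CRISP-Real2Sim | vis_scripts/viser_m/prox_utils.py | build_global_segments_greedy
-- ===== SOURCE A (Python) =====
-- from typing import Dict, List, Tuple
-- from typing import Dict, List, Tuple, Optional, Set
-- from collections import defaultdict
-- from typing import Dict, List, Tuple, Optional
-- from typing import Tuple
-- from typing import Dict, List, Tuple, Optional
-- from typing import Dict, List
-- from typing import Dict, List, Union
-- from typing import Dict, List, Tuple, Optional
-- from typing import Dict, List, Tuple, Optional
-- from typing import Dict, List, Union, Optional
--
-- def build_global_segments_greedy(
--     all_frame_segments: List[Dict[int, Dict]],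
--     correspondence_pairs: List[Tuple[int, int, int, int]]
-- ) -> Dict[int, List[Tuple[int, int]]]:
--     """
--     Union-find over *all* correspondence pairs (frame_i, seg_i, frame_j, seg_j).
--     Returns {global_id: [(frame_idx, local_seg_id), …]}.
--     """
--     parent = {}
--     def key(fi, sid): return f"{fi}_{sid}"
--     def find(x):
--         parent.setdefault(x, x)
--         if parent[x] != x:
--             parent[x] = find(parent[x])
--         return parent[x]
--     def union(a, b):
--         pa, pb = find(a), find(b)
--         if pa != pb:
--             parent[pa] = pb
--
--     # initialise every local segment
--     for fi, segs in enumerate(all_frame_segments):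
--         for sid in segs:
--             find(key(fi, sid))
--
--     # greedy unions
--     for fi, sid_i, fj, sid_j in correspondence_pairs:
--         union(key(fi, sid_i), key(fj, sid_j))
--
--     # collect & renumber
--     groups = defaultdict(list)
--     for fi, segs in enumerate(all_frame_segments):
--         for sid in segs:
--             groups[find(key(fi, sid))].append((fi, sid))
--
--     return {gid: members for gid, members in enumerate(groups.values())}
-- ===== SOURCE B (Python) =====
-- def build_global_segments_greedy(all_frame_segments, correspondence_pairs):
--     """
--     Same grouping, but with a flat label map merged by relabelling instead of a
--     union-find forest: every segment key gets an integer label, each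
--     correspondence pair rewrites one label into the other, and groups are then
--     collected frame by frame exactly as before.
--     """
--     label = {}
--
--     def get_label(k):
--         if k not in label:
--             label[k] = len(label)
--         return label[k]
--
--     for fi, segs in enumerate(all_frame_segments):
--         for sid in segs:
--             get_label(f"{fi}_{sid}")
--
--     for fi, sid_i, fj, sid_j in correspondence_pairs:
--         la = get_label(f"{fi}_{sid_i}")
--         lb = get_label(f"{fj}_{sid_j}")
--         if la != lb:
--             label = {k: (lb if v == la else v) for k, v in label.items()}
--
--     groups = {}
--     for fi, segs in enumerate(all_frame_segments):
--         for sid in segs: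
--             groups.setdefault(label[f"{fi}_{sid}"], []).append((fi, sid))
--
--     return {gid: members for gid, members in enumerate(groups.values())}
-- ===== Notes on version B (the rewrite author's own statement) =====
-- stated objective: alternative
-- what changed: Replaces the recursive union-find forest (parent dict, find with path compression, greedy unions) with a flat key-to-label map: every segment key gets an integer label and each correspondence pair merges two classes by rewriting one label into the other; the frame-order collection scan and renumbering are kept, so the output is identical.
import Mathlib
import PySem

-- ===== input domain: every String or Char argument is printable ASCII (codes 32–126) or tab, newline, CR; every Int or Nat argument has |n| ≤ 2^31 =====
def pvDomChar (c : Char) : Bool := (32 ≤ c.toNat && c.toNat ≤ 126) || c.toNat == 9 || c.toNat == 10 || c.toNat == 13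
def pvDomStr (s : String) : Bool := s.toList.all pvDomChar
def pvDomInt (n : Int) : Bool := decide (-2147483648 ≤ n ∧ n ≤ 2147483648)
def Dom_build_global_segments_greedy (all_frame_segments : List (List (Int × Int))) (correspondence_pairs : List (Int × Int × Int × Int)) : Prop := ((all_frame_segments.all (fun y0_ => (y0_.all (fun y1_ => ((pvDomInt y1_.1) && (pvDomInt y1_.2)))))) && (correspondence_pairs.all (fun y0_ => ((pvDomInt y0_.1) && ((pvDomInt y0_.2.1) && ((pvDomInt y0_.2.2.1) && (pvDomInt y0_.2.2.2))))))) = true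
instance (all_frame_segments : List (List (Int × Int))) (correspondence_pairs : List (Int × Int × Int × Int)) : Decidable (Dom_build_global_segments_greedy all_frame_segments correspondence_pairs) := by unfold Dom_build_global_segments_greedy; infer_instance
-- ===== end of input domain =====

-- B replaces A's recursive union-find forest by a flat label map merged by relabelling; equivalence of the
-- returned value is proved (neither version mutates its arguments).

-- ===== PORT A =====
-- keys f"{fi}_{sid}" are modelled as lists of characters (PySem.Chars style)
abbrev PvK := List Char
abbrev PvP := PySem.Dict PvK PvK
abbrev PvGrp := List (Int × Int)

def pvKey (fi sid : Int) : PvK := PySem.Int.toChars fi ++ '_' :: PySem.Int.toChars sid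

-- A's recursive `find` with path compression; the fuel only makes the recursion structural
-- (it is proved never to run out on the calls A makes)
def pvFind : Nat → PvP → PvK → PvP × PvK
  | 0, p, x => (p, x)
  | fuel+1, p, x =>
    let p1 := p.setdefault x x
    let px := p1.getD x x
    if px = x then (p1, x)
    else
      let fr := pvFind fuel p1 px
      (fr.1.insert x fr.2, fr.2)

def pvUnion (fuel : Nat) (p : PvP) (a b : PvK) : PvP :=
  let fa := pvFind fuel p a
  let fb := pvFind fuel fa.1 b
  if fa.2 ≠ fb.2 then fb.1.insert fa.2 fb.2 else fb.1

def build_global_segments_greedy (all_frame_segments : List (List (Int × Int))) (correspondence_pairs : List (Int × Int × Int × Int)) : List (Int × List (Int × Int)) :=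
  let fuel := correspondence_pairs.length + 1
  -- initialise every local segment
  let p0 : PvP := (PySem.List.enumerate all_frame_segments).foldl (fun p fs =>
      ((PySem.Dict.ofList fs.2).keys).foldl (fun p sid => (pvFind fuel p (pvKey fs.1 sid)).1) p) PySem.Dict.empty
  -- greedy unions
  let p1 := correspondence_pairs.foldl (fun p q => pvUnion fuel p (pvKey q.1 q.2.1) (pvKey q.2.2.1 q.2.2.2)) p0
  -- collect & renumber
  let st := (PySem.List.enumerate all_frame_segments).foldl (fun st fs =>
      ((PySem.Dict.ofList fs.2).keys).foldl (fun (st : PvP × PySem.Dict PvK PvGrp) sid =>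
        let fr := pvFind fuel st.1 (pvKey fs.1 sid)
        (fr.1, st.2.modify fr.2 [] (fun l => l ++ [(fs.1, sid)]))) st)
      ((p1, PySem.Dict.empty) : PvP × PySem.Dict PvK PvGrp)
  PySem.List.enumerate st.2.values

-- ===== PORT B =====
abbrev PvL := PySem.Dict PvK Int

def pvGetLabel (L : PvL) (k : PvK) : PvL × Int :=
  if L.contains k then (L, L.getD k 0)
  else (L.insert k (L.size : Int), (L.size : Int))

def build_global_segments_greedy_alt (all_frame_segments : List (List (Int × Int))) (correspondence_pairs : List (Int × Int × Int × Int)) : List (Int × List (Int × Int)) :=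
  let L0 : PvL := (PySem.List.enumerate all_frame_segments).foldl (fun L fs =>
      ((PySem.Dict.ofList fs.2).keys).foldl (fun L sid => (pvGetLabel L (pvKey fs.1 sid)).1) L) PySem.Dict.empty
  let L1 := correspondence_pairs.foldl (fun L q =>
      let ga := pvGetLabel L (pvKey q.1 q.2.1)
      let gb := pvGetLabel ga.1 (pvKey q.2.2.1 q.2.2.2)
      if ga.2 ≠ gb.2 then
        PySem.Dict.ofList (gb.1.items.map (fun kv => (kv.1, if kv.2 = ga.2 then gb.2 else kv.2)))
      else gb.1) L0
  let g := (PySem.List.enumerate all_frame_segments).foldl (fun g fs =>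
      ((PySem.Dict.ofList fs.2).keys).foldl (fun (g : PySem.Dict Int PvGrp) sid =>
        g.modify (L1.getD (pvKey fs.1 sid) 0) [] (fun l => l ++ [(fs.1, sid)])) g)
      (PySem.Dict.empty : PySem.Dict Int PvGrp)
  PySem.List.enumerate g.values

-- ===== PRECONDITION & SPEC =====
def Spec_build_global_segments_greedy (all_frame_segments : List (List (Int × Int))) (correspondence_pairs : List (Int × Int × Int × Int)) (out : List (Int × List (Int × Int))) : Prop := out = build_global_segments_greedy_alt all_frame_segments correspondence_pairs
instance (all_frame_segments : List (List (Int × Int))) (correspondence_pairs : List (Int × Int × Int × Int)) (out : List (Int × List (Int × Int))) : Decidable (Spec_build_global_segments_greedy all_frame_segments correspondence_pairs out) := by unfold Spec_build_global_segments_greedy; infer_instance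

-- ===== CLAIM (what is proved, stated in full; the proofs are below) =====
def Claim_equal_build_global_segments_greedy : Prop := ∀ (all_frame_segments : List (List (Int × Int))) (correspondence_pairs : List (Int × Int × Int × Int)), Dom_build_global_segments_greedy all_frame_segments correspondence_pairs → Spec_build_global_segments_greedy all_frame_segments correspondence_pairs (build_global_segments_greedy all_frame_segments correspondence_pairs)

-- ===== LEMMAS AND PROOFS =====

-- the flattened (frame, segment-id) scan both programs perform
def pvItemsOf (afs : List (List (Int × Int))) : List (Int × Int) :=
  (PySem.List.enumerate afs).flatMap (fun fs => ((PySem.Dict.ofList fs.2).keys).map (fun sid => (fs.1, sid)))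

theorem pv_foldl_flatMap {α β γ : Type} (l : List α) (g : α → List β) (f : γ → β → γ) (i : γ) :
    (l.flatMap g).foldl f i = l.foldl (fun acc x => (g x).foldl f acc) i := by
  induction l generalizing i with
  | nil => rfl
  | cons h t ih => simp [List.flatMap_cons, List.foldl_append, ih]

-- reachability in A's parent forest (r is reached from x in n parent steps; `getD x x = x`
-- is Python's `parent.setdefault(x, x) == x` view of a root, also valid for absent keys)
inductive pvReach (p : PvP) : PvK → PvK → Nat → Prop
  | root (x : PvK) (h : p.getD x x = x) : pvReach p x x 0
  | step (x y r : PvK) (n : Nat) (h : p.get? x = some y) (hne : y ≠ x) (hr : pvReach p y r n) :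
      pvReach p x r (n+1)

def pvIsRoot (p : PvP) (x r : PvK) : Prop := ∃ n, pvReach p x r n
def pvSameRoot (p : PvP) (x y : PvK) : Prop := ∃ r, pvIsRoot p x r ∧ pvIsRoot p y r
def pvTotal (p : PvP) (k : Nat) : Prop := ∀ x, ∃ r n, pvReach p x r n ∧ n ≤ k
def pvRootsIn (p : PvP) : Prop := ∀ x r, p.contains x = true → pvIsRoot p x r → p.contains r = true

-- B-side: two keys carry the same label (or are the same key)
def pvLabEq (L : PvL) (x y : PvK) : Prop := x = y ∨ ∃ v, L.get? x = some v ∧ L.get? y = some v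
def pvLabFresh (L : PvL) : Prop := ∀ k v, L.get? k = some v → 0 ≤ v ∧ v < (L.size : Int)

def pvClosed (p : PvP) : Prop := ∀ x y, p.get? x = some y → y = x ∨ p.contains y = true

-- the gluing invariant between A's forest and B's label map
def pvInv (p : PvP) (L : PvL) (k : Nat) : Prop :=
  pvTotal p k ∧ pvRootsIn p ∧ pvClosed p ∧ pvLabFresh L ∧ L.keys.Nodup ∧
  (∀ z, p.contains z = L.contains z) ∧
  (∀ x y, pvSameRoot p x y ↔ pvLabEq L x y)

theorem pvReach_det {p : PvP} {x r r' : PvK} {n n' : Nat}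
    (h : pvReach p x r n) (h' : pvReach p x r' n') : r = r' ∧ n = n' := by
  induction h generalizing r' n' with
  | root w hw =>
    cases h' with
    | root => exact ⟨rfl, rfl⟩
    | step _ y _ k hg hne _ =>
      rw [PySem.Dict.getD_eq_get?_getD, hg] at hw
      exact absurd hw hne
  | step w y r k hg hne hr ih =>
    cases h' with
    | root _ hw =>
      rw [PySem.Dict.getD_eq_get?_getD, hg] at hw
      exact absurd hw hne
    | step _ y' _ k' hg' hne' hr' =>
      rw [hg] at hg'
      obtain rfl : y' = y := (Option.some.inj hg').symm
      obtain ⟨hr1, hn1⟩ := ih hr'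
      exact ⟨hr1, by omega⟩

theorem pvReach_root_fix {p : PvP} {x r : PvK} {n : Nat} (h : pvReach p x r n) :
    p.getD r r = r := by
  induction h with
  | root _ hw => exact hw
  | step _ _ _ _ _ _ _ ih => exact ih

theorem pvReach_absent {p : PvP} {x r : PvK} {n : Nat}
    (hc : p.contains x = false) (h : pvReach p x r n) : r = x ∧ n = 0 := by
  have hn : p.get? x = none := (PySem.Dict.get?_eq_none_iff_contains _ _).2 hc
  cases h with
  | root => exact ⟨rfl, rfl⟩
  | step _ y _ k hg => rw [hn] at hg; cases hg

theorem pvReach_root_mem {p : PvP} {x r : PvK} {n : Nat} (hcl : pvClosed p)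
    (h : pvReach p x r n) : r = x ∨ p.contains r = true := by
  induction h with
  | root => exact Or.inl rfl
  | step z y r k hg hne hr ih =>
    rcases ih with rfl | hm
    · rcases hcl z r hg with rfl | hm
      · exact Or.inl rfl
      · exact Or.inr hm
    · exact Or.inr hm

theorem pv_get?_of_contains {p : PvP} {x : PvK} (h : p.contains x = true) :
    p.get? x = some (p.getD x x) := by
  cases hg : p.get? x with
  | none => rw [(PySem.Dict.get?_eq_none_iff_contains _ _).1 hg] at h; cases h
  | some v => rw [PySem.Dict.getD_eq_get?_getD, hg]; rfl

theorem pv_setdefault_eq {κ ν : Type} [BEq κ] (d : PySem.Dict κ ν) (k : κ) (v : ν) :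
    d.setdefault k v = if d.contains k = true then d else d.insert k v := by
  simp only [PySem.Dict.setdefault, PySem.Dict.insert]
  split_ifs with h
  · rfl
  · rfl

theorem pvReach_insert_self {p : PvP} {x : PvK} (hc : p.contains x = false) :
    ∀ y s m, pvReach p y s m ↔ pvReach (p.insert x x) y s m := by
  have hnone : p.get? x = none := (PySem.Dict.get?_eq_none_iff_contains _ _).2 hc
  intro y0 s0 m0
  constructor
  · intro h
    induction h with
    | root z hz =>
      refine pvReach.root z ?_
      rw [PySem.Dict.getD_insert]
      by_cases hzx : z = x
      · rw [if_pos hzx, hzx]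
      · rw [if_neg hzx]; exact hz
    | step z w r k hg hne hr ih =>
      have hzx : z ≠ x := by rintro rfl; rw [hnone] at hg; cases hg
      exact pvReach.step z w r _ (by rw [PySem.Dict.get?_insert, if_neg hzx]; exact hg) hne ih
  · intro h
    induction h with
    | root z hz =>
      rw [PySem.Dict.getD_insert] at hz
      refine pvReach.root z ?_
      by_cases hzx : z = x
      · rw [hzx, PySem.Dict.getD_eq_get?_getD, hnone]; rfl
      · rw [if_neg hzx] at hz; exact hz
    | step z w r k hg hne hr ih =>
      rw [PySem.Dict.get?_insert] at hg
      by_cases hzx : z = x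
      · rw [if_pos hzx] at hg
        obtain rfl : w = x := by injection hg with hh; exact hh.symm
        exact absurd hzx.symm hne
      · rw [if_neg hzx] at hg
        exact pvReach.step z w r _ hg hne ih

theorem pvReach_insert_root {p : PvP} {x r : PvK} (hr : pvIsRoot p x r) :
    ∀ y s m, pvReach p y s m → ∃ m' ≤ m, pvReach (p.insert x r) y s m' := by
  obtain ⟨k0, hxr⟩ := hr
  have hrfix : p.getD r r = r := pvReach_root_fix hxr
  intro y0 s0 m0 h
  induction h with
  | root z hz =>
    refine ⟨0, le_rfl, pvReach.root z ?_⟩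
    rw [PySem.Dict.getD_insert]
    by_cases hzx : z = x
    · have hxx : pvReach p x x 0 := hzx ▸ pvReach.root z hz
      have hrx : r = x := (pvReach_det hxr hxx).1
      rw [if_pos hzx, hrx, hzx]
    · rw [if_neg hzx]; exact hz
  | step z w s k hg hne hs ih =>
    by_cases hzx : z = x
    · subst hzx
      have hsr : s = r := (pvReach_det (pvReach.step z w s k hg hne hs) hxr).1
      subst hsr
      by_cases hrx : s = z
      · refine ⟨0, by omega, ?_⟩
        have : pvReach (p.insert z s) z z 0 := by
          refine pvReach.root z ?_
          rw [PySem.Dict.getD_insert, if_pos rfl, hrx]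
        exact hrx ▸ this
      · refine ⟨1, by omega, pvReach.step z s s 0 ?_ hrx ?_⟩
        · rw [PySem.Dict.get?_insert, if_pos rfl]
        · refine pvReach.root s ?_
          rw [PySem.Dict.getD_insert, if_neg hrx]
          exact hrfix
    · obtain ⟨m', hm', h'⟩ := ih
      exact ⟨m' + 1, by omega,
        pvReach.step z w s m' (by rw [PySem.Dict.get?_insert, if_neg hzx]; exact hg) hne h'⟩

theorem pvFind_spec : ∀ (fuel : Nat) (p : PvP) (x r : PvK) (n : Nat),
    pvReach p x r n → n < fuel → pvClosed p →
    (pvFind fuel p x).2 = r ∧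
    (∀ y s m, pvReach p y s m → ∃ m' ≤ m, pvReach (pvFind fuel p x).1 y s m') ∧
    (∀ z, (pvFind fuel p x).1.contains z = (p.contains z || z == x)) ∧
    pvClosed (pvFind fuel p x).1 := by
  intro fuel
  induction fuel with
  | zero => intro p x r n h hn; omega
  | succ fuel ih =>
    intro p x r n h hn hcl
    by_cases hx : p.contains x = true
    · have hp1 : p.setdefault x x = p := by rw [pv_setdefault_eq, if_pos hx]
      by_cases hpx : p.getD x x = x
      · have hres : pvFind (fuel + 1) p x = (p, x) := by
          simp [pvFind, hp1, hpx]
        obtain ⟨rfl, -⟩ := pvReach_det (pvReach.root x hpx) h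
        rw [hres]
        refine ⟨rfl, fun y s m hy => ⟨m, le_rfl, hy⟩, fun z => ?_, hcl⟩
        by_cases hzx : z = x
        · subst hzx; simp [hx]
        · simp [beq_iff_eq, hzx]
      · have hgy : p.get? x = some (p.getD x x) := pv_get?_of_contains hx
        have hres : pvFind (fuel + 1) p x
            = ((pvFind fuel p (p.getD x x)).1.insert x (pvFind fuel p (p.getD x x)).2,
               (pvFind fuel p (p.getD x x)).2) := by
          simp only [pvFind, hp1]
          rw [if_neg hpx]
        cases h with
        | root _ hz => exact absurd hz hpx
        | step _ y' r n' hg' hne' hr' =>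
          obtain rfl : y' = p.getD x x := by
            rw [hgy] at hg'; injection hg' with hh; exact hh.symm
          obtain ⟨h2, hmono, hcont, hcl'⟩ := ih p (p.getD x x) r n' hr' (by omega) hcl
          have hroot : pvIsRoot (pvFind fuel p (p.getD x x)).1 x r := by
            obtain ⟨m', -, hm'⟩ := hmono x r (n' + 1)
              (pvReach.step x (p.getD x x) r n' hgy hne' hr')
            exact ⟨m', hm'⟩
          have hyc : p.contains (p.getD x x) = true := by
            rcases hcl x (p.getD x x) hgy with hh | hm
            · exact absurd hh hpx
            · exact hm
          have hrmem : r = x ∨ (pvFind fuel p (p.getD x x)).1.contains r = true := by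
            rcases pvReach_root_mem hcl (pvReach.step x (p.getD x x) r n' hgy hne' hr')
              with hh | hm
            · exact Or.inl hh
            · right; rw [hcont r, hm]; rfl
          rw [hres]
          refine ⟨h2, ?_, ?_, ?_⟩
          · intro y0 s m hy0
            obtain ⟨m1, hm1, h1⟩ := hmono y0 s m hy0
            obtain ⟨m2, hm2, h2'⟩ := pvReach_insert_root (h2 ▸ hroot) y0 s m1 h1
            exact ⟨m2, le_trans hm2 hm1, h2'⟩
          · intro z
            rw [PySem.Dict.contains_insert, hcont z]
            by_cases hzy : z = p.getD x x
            · subst hzy; simp [hyc]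
            · by_cases hzx : z = x
              · subst hzx; simp
              · have hb1 : (z == x) = false := beq_eq_false_iff_ne.mpr hzx
                have hb2 : (z == PySem.Dict.getD p x x) = false := beq_eq_false_iff_ne.mpr hzy
                simp [hb1, hb2]
          · intro z w hzw
            rw [PySem.Dict.get?_insert] at hzw
            by_cases hzx : z = x
            · rw [if_pos hzx] at hzw
              obtain rfl : w = (pvFind fuel p (p.getD x x)).2 := by
                injection hzw with hh; exact hh.symm
              rcases hrmem with hh | hm
              · left; rw [h2, hh, hzx]
              · right
                rw [PySem.Dict.contains_insert, h2]
                simp [hm]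
            · rw [if_neg hzx] at hzw
              rcases hcl' z w hzw with rfl | hm
              · exact Or.inl rfl
              · right; rw [PySem.Dict.contains_insert]; simp [hm]
    · have hx' : p.contains x = false := Bool.eq_false_iff.mpr hx
      obtain ⟨hrx, -⟩ := pvReach_absent hx' h
      have hp1 : p.setdefault x x = p.insert x x := by rw [pv_setdefault_eq, if_neg hx]
      have hpx : (p.insert x x).getD x x = x := by
        rw [PySem.Dict.getD_insert, if_pos rfl]
      have hres : pvFind (fuel + 1) p x = (p.insert x x, x) := by
        simp [pvFind, hp1, hpx]
      rw [hres]
      refine ⟨hrx.symm, ?_, ?_, ?_⟩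
      · intro y s m hy
        exact ⟨m, le_rfl, (pvReach_insert_self hx' y s m).1 hy⟩
      · intro z
        rw [PySem.Dict.contains_insert, Bool.or_comm]
      · intro z w hzw
        rw [PySem.Dict.get?_insert] at hzw
        by_cases hzx : z = x
        · rw [if_pos hzx] at hzw
          obtain rfl : w = x := by injection hzw with hh; exact hh.symm
          exact Or.inl hzx.symm
        · rw [if_neg hzx] at hzw
          rcases hcl z w hzw with rfl | hm
          · exact Or.inl rfl
          · right; rw [PySem.Dict.contains_insert]; simp [hm]

theorem pvIsRoot_eq_of_mono {p p' : PvP}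
    (ht : ∀ y, ∃ r, pvIsRoot p y r)
    (hm : ∀ y s m, pvReach p y s m → ∃ m' ≤ m, pvReach p' y s m') :
    ∀ y s, pvIsRoot p' y s ↔ pvIsRoot p y s := by
  intro y s
  constructor
  · rintro ⟨m', h'⟩
    obtain ⟨r, n, hn⟩ := ht y
    obtain ⟨m2, -, h2⟩ := hm y r n hn
    obtain ⟨rfl, -⟩ := pvReach_det h' h2
    exact ⟨n, hn⟩
  · rintro ⟨n, hn⟩
    obtain ⟨m', -, h'⟩ := hm y s n hn
    exact ⟨m', h'⟩

theorem pvSameRoot_symm {p : PvP} {x y : PvK} (h : pvSameRoot p x y) : pvSameRoot p y x := by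
  obtain ⟨r, hx, hy⟩ := h; exact ⟨r, hy, hx⟩

theorem pvSameRoot_trans {p : PvP} {x y z : PvK}
    (h1 : pvSameRoot p x y) (h2 : pvSameRoot p y z) : pvSameRoot p x z := by
  obtain ⟨r, hx, ⟨n, hy⟩⟩ := h1
  obtain ⟨r', ⟨n', hy'⟩, hz⟩ := h2
  obtain ⟨rfl, -⟩ := pvReach_det hy hy'
  exact ⟨r, hx, hz⟩

def pvMerge (R : PvK → PvK → Prop) (a b x y : PvK) : Prop :=
  R x y ∨ (R x a ∧ R b y) ∨ (R x b ∧ R a y)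

theorem pvMerge_self_of {R : PvK → PvK → Prop} {a b : PvK}
    (hsym : ∀ x y, R x y → R y x)
    (htrans : ∀ x y z, R x y → R y z → R x z)
    (hab : R a b) (x y : PvK) :
    pvMerge R a b x y ↔ R x y := by
  constructor
  · rintro (h | ⟨h1, h2⟩ | ⟨h1, h2⟩)
    · exact h
    · exact htrans _ _ _ (htrans _ _ _ h1 hab) h2
    · exact htrans _ _ _ (htrans _ _ _ h1 (hsym _ _ hab)) h2
  · exact fun h => Or.inl h

theorem pvMerge_congr {R R' : PvK → PvK → Prop} {a b : PvK}
    (h : ∀ x y, R x y ↔ R' x y) (x y : PvK) :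
    pvMerge R a b x y ↔ pvMerge R' a b x y := by
  unfold pvMerge
  rw [h x y, h x a, h b y, h x b, h a y]

theorem pvReach_link_fwd {p : PvP} {ra rb : PvK} (hra : p.getD ra ra = ra)
    (hrb : p.getD rb rb = rb) (hne : ra ≠ rb) :
    ∀ z s m, pvReach p z s m →
      (s = ra → pvReach (p.insert ra rb) z rb (m+1)) ∧
      (s ≠ ra → pvReach (p.insert ra rb) z s m) := by
  have hrbroot : pvReach (p.insert ra rb) rb rb 0 := by
    refine pvReach.root rb ?_
    rw [PySem.Dict.getD_insert, if_neg (Ne.symm hne)]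
    exact hrb
  intro z0 s0 m0 h
  induction h with
  | root z hz =>
    constructor
    · intro hza
      subst hza
      exact pvReach.step z rb rb 0
        (by rw [PySem.Dict.get?_insert, if_pos rfl]) (Ne.symm hne) hrbroot
    · intro hza
      exact pvReach.root z (by rw [PySem.Dict.getD_insert, if_neg hza]; exact hz)
  | step z w s n hg hne' hs ih =>
    have hzra : z ≠ ra := by
      intro hza
      rw [← hza, PySem.Dict.getD_eq_get?_getD, hg] at hra
      exact hne' hra
    constructor
    · intro hsa
      exact pvReach.step z w rb (n+1)
        (by rw [PySem.Dict.get?_insert, if_neg hzra]; exact hg) hne' (ih.1 hsa)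
    · intro hsa
      exact pvReach.step z w s n
        (by rw [PySem.Dict.get?_insert, if_neg hzra]; exact hg) hne' (ih.2 hsa)

theorem pvReach_link_bwd {p : PvP} {ra rb : PvK} (hra : p.getD ra ra = ra)
    (hrb : p.getD rb rb = rb) (hne : ra ≠ rb) :
    ∀ z s m, pvReach (p.insert ra rb) z s m →
      (∃ m', pvReach p z s m' ∧ s ≠ ra) ∨ (∃ m', pvReach p z ra m' ∧ s = rb) := by
  have hrbroot : pvReach (p.insert ra rb) rb rb 0 := by
    refine pvReach.root rb ?_
    rw [PySem.Dict.getD_insert, if_neg (Ne.symm hne)]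
    exact hrb
  intro z0 s0 m0 h
  induction h with
  | root z hz =>
    rw [PySem.Dict.getD_insert] at hz
    by_cases hza : z = ra
    · rw [if_pos hza] at hz
      rw [hza] at hz
      exact absurd hz.symm hne
    · rw [if_neg hza] at hz
      exact Or.inl ⟨0, pvReach.root z hz, hza⟩
  | step z w s n hg hne' hs ih =>
    rw [PySem.Dict.get?_insert] at hg
    by_cases hza : z = ra
    · subst hza
      rw [if_pos rfl] at hg
      obtain rfl : w = rb := (Option.some.inj hg).symm
      obtain ⟨hsrb, -⟩ := pvReach_det hrbroot hs
      exact Or.inr ⟨0, pvReach.root z hra, hsrb.symm⟩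
    · rw [if_neg hza] at hg
      rcases ih with ⟨m', hm', hsra⟩ | ⟨m', hm', rfl⟩
      · exact Or.inl ⟨m'+1, pvReach.step z w s m' hg hne' hm', hsra⟩
      · exact Or.inr ⟨m'+1, pvReach.step z w ra m' hg hne' hm', rfl⟩

theorem pv_if_merge {α : Type} [DecidableEq α] (ra rb rx ry : α) (hne : ra ≠ rb) :
    ((if rx = ra then rb else rx) = (if ry = ra then rb else ry)) ↔
    (rx = ry ∨ (rx = ra ∧ rb = ry) ∨ (rx = rb ∧ ra = ry)) := by
  by_cases h1 : rx = ra <;> by_cases h2 : ry = ra <;>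
    simp [h1, h2, hne, Ne.symm hne, eq_comm] <;> tauto

theorem pvUnion_spec (fuel k : Nat) (p : PvP) (a b : PvK)
    (ht : pvTotal p k) (hri : pvRootsIn p) (hcl : pvClosed p) (hf : k < fuel) :
    pvTotal (pvUnion fuel p a b) (k+1) ∧ pvRootsIn (pvUnion fuel p a b) ∧
    pvClosed (pvUnion fuel p a b) ∧
    (∀ z, (pvUnion fuel p a b).contains z = (p.contains z || z == a || z == b)) ∧
    (∀ x y, pvSameRoot (pvUnion fuel p a b) x y ↔ pvMerge (pvSameRoot p) a b x y) := by
  obtain ⟨ra, na, hna, hnak⟩ := ht a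
  obtain ⟨f2a, fmonoa, fconta, fcla⟩ := pvFind_spec fuel p a ra na hna (lt_of_le_of_lt hnak hf) hcl
  have hteq : ∀ y, ∃ r, pvIsRoot p y r := by
    intro y; obtain ⟨r, n, hn, -⟩ := ht y; exact ⟨r, n, hn⟩
  have heq1 : ∀ y s, pvIsRoot (pvFind fuel p a).1 y s ↔ pvIsRoot p y s :=
    pvIsRoot_eq_of_mono hteq fmonoa
  have ht1 : pvTotal (pvFind fuel p a).1 k := by
    intro y
    obtain ⟨r, n, hn, hnk⟩ := ht y
    obtain ⟨m', hm', h'⟩ := fmonoa y r n hn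
    exact ⟨r, m', h', le_trans hm' hnk⟩
  obtain ⟨rb, nb, hnb, hnbk⟩ := ht1 b
  obtain ⟨f2b, fmonob, fcontb, fclb⟩ :=
    pvFind_spec fuel (pvFind fuel p a).1 b rb nb hnb (lt_of_le_of_lt hnbk hf) fcla
  have ht1eq : ∀ y, ∃ r, pvIsRoot (pvFind fuel p a).1 y r := by
    intro y; obtain ⟨r, n, hn, -⟩ := ht1 y; exact ⟨r, n, hn⟩
  have heq2 : ∀ y s, pvIsRoot (pvFind fuel (pvFind fuel p a).1 b).1 y s ↔ pvIsRoot p y s := by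
    intro y s
    rw [pvIsRoot_eq_of_mono ht1eq fmonob y s]
    exact heq1 y s
  have ht2 : pvTotal (pvFind fuel (pvFind fuel p a).1 b).1 k := by
    intro y
    obtain ⟨r, n, hn, hnk⟩ := ht1 y
    obtain ⟨m', hm', h'⟩ := fmonob y r n hn
    exact ⟨r, m', h', le_trans hm' hnk⟩
  have hcont2 : ∀ z, (pvFind fuel (pvFind fuel p a).1 b).1.contains z
      = (p.contains z || z == a || z == b) := by
    intro z
    rw [fcontb z, fconta z]
  have hra_p : pvIsRoot p a ra := ⟨na, hna⟩
  have hrb_p : pvIsRoot p b rb := (heq1 b rb).1 ⟨nb, hnb⟩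
  have hconta_a : (pvFind fuel (pvFind fuel p a).1 b).1.contains a = true := by
    rw [hcont2]; simp
  have hconta_b : (pvFind fuel (pvFind fuel p a).1 b).1.contains b = true := by
    rw [hcont2]; simp
  have hri2 : pvRootsIn (pvFind fuel (pvFind fuel p a).1 b).1 := by
    intro x r hx hr
    have hrp : pvIsRoot p x r := (heq2 x r).1 hr
    rw [hcont2] at hx
    rw [hcont2]
    by_cases hxp : p.contains x = true
    · rw [hri x r hxp hrp]; rfl
    · have hx' : p.contains x = false := Bool.eq_false_iff.mpr hxp
      obtain ⟨n0, h0⟩ := hrp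
      obtain ⟨rfl, -⟩ := pvReach_absent hx' h0
      rw [hx'] at hx ⊢
      exact hx
  -- roots of a and b are keys after the two finds
  have hmem_ra : (pvFind fuel (pvFind fuel p a).1 b).1.contains ra = true :=
    hri2 a ra hconta_a ((heq2 a ra).2 hra_p)
  have hmem_rb : (pvFind fuel (pvFind fuel p a).1 b).1.contains rb = true :=
    hri2 b rb hconta_b ((heq2 b rb).2 hrb_p)
  have hub : pvUnion fuel p a b =
      if ra ≠ rb then (pvFind fuel (pvFind fuel p a).1 b).1.insert ra rb
      else (pvFind fuel (pvFind fuel p a).1 b).1 := by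
    simp only [pvUnion]
    rw [f2a, f2b]
  by_cases hrr : ra = rb
  · have hub' : pvUnion fuel p a b = (pvFind fuel (pvFind fuel p a).1 b).1 := by
      rw [hub, if_neg (by simp [hrr])]
    have hsame : ∀ x y, pvSameRoot (pvUnion fuel p a b) x y ↔ pvSameRoot p x y := by
      intro x y
      rw [hub']
      constructor
      · rintro ⟨r, hx, hy⟩; exact ⟨r, (heq2 x r).1 hx, (heq2 y r).1 hy⟩
      · rintro ⟨r, hx, hy⟩; exact ⟨r, (heq2 x r).2 hx, (heq2 y r).2 hy⟩
    have hab : pvSameRoot p a b := ⟨ra, hra_p, hrr ▸ hrb_p⟩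
    refine ⟨?_, ?_, ?_, ?_, ?_⟩
    · rw [hub']; intro x
      obtain ⟨r, n, hn, hnk⟩ := ht2 x
      exact ⟨r, n, hn, by omega⟩
    · rw [hub']; exact hri2
    · rw [hub']; exact fclb
    · rw [hub']; exact hcont2
    · intro x y
      rw [hsame x y]
      exact (pvMerge_self_of (R := pvSameRoot p) (fun _ _ h => pvSameRoot_symm h)
        (fun _ _ _ h1 h2 => pvSameRoot_trans h1 h2) hab x y).symm
  · -- real link
    have hne : ra ≠ rb := hrr
    have hub' : pvUnion fuel p a b = (pvFind fuel (pvFind fuel p a).1 b).1.insert ra rb := by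
      rw [hub, if_pos (by simp [hne])]
    set p2 := (pvFind fuel (pvFind fuel p a).1 b).1 with hp2
    have hra2 : pvIsRoot p2 a ra := (heq2 a ra).2 hra_p
    have hrb2 : pvIsRoot p2 b rb := (heq2 b rb).2 hrb_p
    have hrafix : p2.getD ra ra = ra := by
      obtain ⟨n0, h0⟩ := hra2; exact pvReach_root_fix h0
    have hrbfix : p2.getD rb rb = rb := by
      obtain ⟨n0, h0⟩ := hrb2; exact pvReach_root_fix h0
    have hchar : ∀ z s, pvIsRoot (p2.insert ra rb) z s ↔
        ((pvIsRoot p2 z s ∧ s ≠ ra) ∨ (pvIsRoot p2 z ra ∧ s = rb)) := by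
      intro z s
      constructor
      · rintro ⟨m, hm⟩
        rcases pvReach_link_bwd hrafix hrbfix hne z s m hm with ⟨m', hm', hs⟩ | ⟨m', hm', hs⟩
        · exact Or.inl ⟨⟨m', hm'⟩, hs⟩
        · exact Or.inr ⟨⟨m', hm'⟩, hs⟩
      · rintro (⟨⟨m, hm⟩, hs⟩ | ⟨⟨m, hm⟩, rfl⟩)
        · exact ⟨m, (pvReach_link_fwd hrafix hrbfix hne z s m hm).2 hs⟩
        · exact ⟨m+1, (pvReach_link_fwd hrafix hrbfix hne z ra m hm).1 rfl⟩
    have hcont3 : ∀ z, (p2.insert ra rb).contains z = p2.contains z := by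
      intro z
      rw [PySem.Dict.contains_insert]
      by_cases hz : z = ra
      · subst hz; rw [hmem_ra]; simp
      · have : (z == ra) = false := beq_eq_false_iff_ne.mpr hz
        rw [this]; rfl
    refine ⟨?_, ?_, ?_, ?_, ?_⟩
    · rw [hub']; intro x
      obtain ⟨r, n, hn, hnk⟩ := ht2 x
      by_cases hr : r = ra
      · subst hr
        exact ⟨rb, n+1, (pvReach_link_fwd hrafix hrbfix hne x r n hn).1 rfl, by omega⟩
      · exact ⟨r, n, (pvReach_link_fwd hrafix hrbfix hne x r n hn).2 hr, by omega⟩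
    · rw [hub']
      intro x r hx hr
      rw [hcont3] at hx
      rw [hcont3]
      rcases (hchar x r).1 hr with ⟨hr2, -⟩ | ⟨-, rfl⟩
      · exact hri2 x r hx hr2
      · exact hmem_rb
    · rw [hub']
      intro z w hzw
      rw [PySem.Dict.get?_insert] at hzw
      by_cases hz : z = ra
      · rw [if_pos hz] at hzw
        obtain rfl : w = rb := (Option.some.inj hzw).symm
        right; rw [hcont3]; exact hmem_rb
      · rw [if_neg hz] at hzw
        rcases fclb z w hzw with rfl | hm
        · exact Or.inl rfl
        · right; rw [hcont3]; exact hm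
    · rw [hub']
      intro z
      rw [hcont3, hcont2]
    · rw [hub']
      intro x y
      obtain ⟨rx, nx, hnx, -⟩ := ht2 x
      obtain ⟨ry, ny, hny, -⟩ := ht2 y
      have hx2 : pvIsRoot p2 x rx := ⟨nx, hnx⟩
      have hy2 : pvIsRoot p2 y ry := ⟨ny, hny⟩
      have hdet2 : ∀ u v w, pvIsRoot p2 u v → pvIsRoot p2 u w → v = w := by
        rintro u v w ⟨m1, h1⟩ ⟨m2, h2⟩
        exact (pvReach_det h1 h2).1
      have hsame2 : ∀ u v ru rv, pvIsRoot p2 u ru → pvIsRoot p2 v rv →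
          (pvSameRoot p2 u v ↔ ru = rv) := by
        intro u v ru rv hu hv
        constructor
        · rintro ⟨r, hur, hvr⟩
          rw [hdet2 u ru r hu hur, hdet2 v rv r hv hvr]
        · rintro rfl; exact ⟨ru, hu, hv⟩
      have hsame_p : ∀ u v, pvSameRoot p u v ↔ pvSameRoot p2 u v := by
        intro u v
        constructor
        · rintro ⟨r, hu, hv⟩; exact ⟨r, (heq2 u r).2 hu, (heq2 v r).2 hv⟩
        · rintro ⟨r, hu, hv⟩; exact ⟨r, (heq2 u r).1 hu, (heq2 v r).1 hv⟩
      -- roots in the linked forest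
      have hx3 : pvIsRoot (p2.insert ra rb) x (if rx = ra then rb else rx) := by
        rw [hchar]
        by_cases hxa : rx = ra
        · right; rw [if_pos hxa]; exact ⟨hxa ▸ hx2, rfl⟩
        · left; rw [if_neg hxa]; exact ⟨hx2, hxa⟩
      have hy3 : pvIsRoot (p2.insert ra rb) y (if ry = ra then rb else ry) := by
        rw [hchar]
        by_cases hya : ry = ra
        · right; rw [if_pos hya]; exact ⟨hya ▸ hy2, rfl⟩
        · left; rw [if_neg hya]; exact ⟨hy2, hya⟩
      have hdet3 : ∀ u v w, pvIsRoot (p2.insert ra rb) u v → pvIsRoot (p2.insert ra rb) u w → v = w := by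
        rintro u v w ⟨m1, h1⟩ ⟨m2, h2⟩
        exact (pvReach_det h1 h2).1
      have hmain : pvSameRoot (p2.insert ra rb) x y ↔
          (if rx = ra then rb else rx) = (if ry = ra then rb else ry) := by
        constructor
        · rintro ⟨r, hxr, hyr⟩
          rw [hdet3 x _ r hx3 hxr, hdet3 y _ r hy3 hyr]
        · intro h; exact ⟨_, hx3, h ▸ hy3⟩
      rw [hmain]
      have e1 : pvSameRoot p x y ↔ rx = ry := by
        rw [hsame_p]; exact hsame2 x y rx ry hx2 hy2
      have e2 : pvSameRoot p x a ↔ rx = ra := by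
        rw [hsame_p]; exact hsame2 x a rx ra hx2 hra2
      have e3 : pvSameRoot p x b ↔ rx = rb := by
        rw [hsame_p]; exact hsame2 x b rx rb hx2 hrb2
      have e4 : pvSameRoot p a y ↔ ra = ry := by
        rw [hsame_p]; exact hsame2 a y ra ry hra2 hy2
      have e5 : pvSameRoot p b y ↔ rb = ry := by
        rw [hsame_p]; exact hsame2 b y rb ry hrb2 hy2
      unfold pvMerge
      rw [e1, e2, e3, e4, e5]
      exact pv_if_merge ra rb rx ry hne

-- ===== B-side lemmas =====

theorem pv_get?_of_containsL {L : PvL} {x : PvK} (h : L.contains x = true) (d0 : Int) :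
    L.get? x = some (L.getD x d0) := by
  cases hg : L.get? x with
  | none => rw [(PySem.Dict.get?_eq_none_iff_contains _ _).1 hg] at h; cases h
  | some v => rw [PySem.Dict.getD_eq_get?_getD, hg]; rfl

theorem pvLabEq_symm {L : PvL} {x y : PvK} (h : pvLabEq L x y) : pvLabEq L y x := by
  rcases h with rfl | ⟨v, h1, h2⟩
  · exact Or.inl rfl
  · exact Or.inr ⟨v, h2, h1⟩

theorem pvLabEq_trans {L : PvL} {x y z : PvK} (h1 : pvLabEq L x y) (h2 : pvLabEq L y z) :
    pvLabEq L x z := by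
  rcases h1 with rfl | ⟨v, hx, hy⟩
  · exact h2
  · rcases h2 with rfl | ⟨w, hy', hz⟩
    · exact Or.inr ⟨v, hx, hy⟩
    · rw [hy] at hy'
      obtain rfl : v = w := Option.some.inj hy'
      exact Or.inr ⟨v, hx, hz⟩

theorem pvLabEq_iff_get_left {L : PvL} {a : PvK} {la : Int} (ha : L.get? a = some la) :
    ∀ x, pvLabEq L x a ↔ L.get? x = some la := by
  intro x
  constructor
  · rintro (rfl | ⟨v, hx, hv⟩)
    · exact ha
    · rw [ha] at hv
      obtain rfl : la = v := Option.some.inj hv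
      exact hx
  · intro hx; exact Or.inr ⟨la, hx, ha⟩

theorem pvLabEq_iff_get_right {L : PvL} {a : PvK} {la : Int} (ha : L.get? a = some la) :
    ∀ y, pvLabEq L a y ↔ L.get? y = some la := by
  intro y
  constructor
  · intro h; exact (pvLabEq_iff_get_left ha y).1 (pvLabEq_symm h)
  · intro hy; exact pvLabEq_symm ((pvLabEq_iff_get_left ha y).2 hy)

theorem pvGetLabel_contains (L : PvL) (k : PvK) :
    ∀ z, (pvGetLabel L k).1.contains z = (L.contains z || z == k) := by
  intro z
  unfold pvGetLabel
  by_cases hc : L.contains k = true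
  · rw [if_pos hc]
    by_cases hzk : z = k
    · subst hzk; simp [hc]
    · have : (z == k) = false := beq_eq_false_iff_ne.mpr hzk
      simp [this]
  · rw [if_neg hc]
    simp only [PySem.Dict.contains_insert]
    exact Bool.or_comm _ _

theorem pvGetLabel_get?_self (L : PvL) (k : PvK) :
    (pvGetLabel L k).1.get? k = some (pvGetLabel L k).2 := by
  unfold pvGetLabel
  by_cases hc : L.contains k = true
  · rw [if_pos hc]
    exact pv_get?_of_containsL hc 0
  · rw [if_neg hc]
    simp

theorem pvGetLabel_get?_mono {L : PvL} {z : PvK} {v : Int} (h : L.get? z = some v) (k : PvK) :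
    (pvGetLabel L k).1.get? z = some v := by
  unfold pvGetLabel
  by_cases hc : L.contains k = true
  · rw [if_pos hc]; exact h
  · rw [if_neg hc]
    have hzk : z ≠ k := by
      rintro rfl
      rw [(PySem.Dict.get?_eq_none_iff_contains _ _).2 (Bool.eq_false_iff.mpr hc)] at h
      cases h
    rw [PySem.Dict.get?_insert, if_neg hzk]; exact h

theorem pvGetLabel_fresh {L : PvL} (hf : pvLabFresh L) (k : PvK) :
    pvLabFresh (pvGetLabel L k).1 := by
  unfold pvGetLabel
  by_cases hc : L.contains k = true
  · rw [if_pos hc]; exact hf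
  · rw [if_neg hc]
    intro z v hz
    rw [PySem.Dict.get?_insert] at hz
    have hsize : (L.insert k (L.size : Int)).size = L.size + 1 := by
      rw [PySem.Dict.size_insert, if_neg hc]
    by_cases hzk : z = k
    · rw [if_pos hzk] at hz
      obtain rfl : v = (L.size : Int) := (Option.some.inj hz).symm
      rw [hsize]
      constructor
      · positivity
      · push_cast; omega
    · rw [if_neg hzk] at hz
      obtain ⟨h1, h2⟩ := hf z v hz
      rw [hsize]
      refine ⟨h1, ?_⟩
      push_cast at h2 ⊢
      omega

theorem pvGetLabel_labEq {L : PvL} (hf : pvLabFresh L) (k : PvK) :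
    ∀ x y, pvLabEq (pvGetLabel L k).1 x y ↔ pvLabEq L x y := by
  intro x y
  unfold pvGetLabel
  by_cases hc : L.contains k = true
  · rw [if_pos hc]
  · rw [if_neg hc]
    have hknone : L.get? k = none :=
      (PySem.Dict.get?_eq_none_iff_contains _ _).2 (Bool.eq_false_iff.mpr hc)
    constructor
    · rintro (rfl | ⟨v, hx, hy⟩)
      · exact Or.inl rfl
      · rw [PySem.Dict.get?_insert] at hx hy
        by_cases hxk : x = k
        · rw [if_pos hxk] at hx
          obtain rfl : v = (L.size : Int) := (Option.some.inj hx).symm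
          by_cases hyk : y = k
          · exact Or.inl (hxk.trans hyk.symm)
          · rw [if_neg hyk] at hy
            obtain ⟨-, h2⟩ := hf y _ hy
            omega
        · rw [if_neg hxk] at hx
          by_cases hyk : y = k
          · rw [if_pos hyk] at hy
            obtain rfl : v = (L.size : Int) := (Option.some.inj hy).symm
            obtain ⟨-, h2⟩ := hf x _ hx
            omega
          · rw [if_neg hyk] at hy
            exact Or.inr ⟨v, hx, hy⟩
    · rintro (rfl | ⟨v, hx, hy⟩)
      · exact Or.inl rfl
      · have hxk : x ≠ k := by rintro rfl; rw [hknone] at hx; cases hx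
        have hyk : y ≠ k := by rintro rfl; rw [hknone] at hy; cases hy
        refine Or.inr ⟨v, ?_, ?_⟩
        · rw [PySem.Dict.get?_insert, if_neg hxk]; exact hx
        · rw [PySem.Dict.get?_insert, if_neg hyk]; exact hy

theorem pvGetLabel_keys_nodup {L : PvL} (hk : L.keys.Nodup) (k : PvK) :
    (pvGetLabel L k).1.keys.Nodup := by
  unfold pvGetLabel
  by_cases hc : L.contains k = true
  · rw [if_pos hc]; exact hk
  · rw [if_neg hc]
    exact PySem.Dict.nodup_keys_insert _ _ _ hk

-- the relabelling dict comprehension of B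
def pvRelabel (L : PvL) (la lb : Int) : PvL :=
  PySem.Dict.ofList (L.items.map (fun kv => (kv.1, if kv.2 = la then lb else kv.2)))

theorem pv_update_items {κ ν : Type} [BEq κ] [LawfulBEq κ] :
    ∀ (l : List (κ × ν)) (d : PySem.Dict κ ν),
      (∀ p ∈ l, d.contains p.1 = false) → (l.map Prod.fst).Nodup →
      (d.update l).items = d.items ++ l := by
  intro l
  induction l with
  | nil => intro d _ _; simp [PySem.Dict.update]
  | cons p t ih =>
    intro d hcont hnd
    have hdp : d.contains p.1 = false := hcont p (List.mem_cons_self ..)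
    have hstep : d.update (p :: t) = (d.insert p.1 p.2).update t := by
      simp [PySem.Dict.update]
    rw [hstep, ih (d.insert p.1 p.2) ?_ ?_]
    · rw [PySem.Dict.items_insert_of_not_contains d p.2 hdp]
      simp
    · intro q hq
      rw [PySem.Dict.contains_insert]
      have hqp : q.1 ≠ p.1 := by
        simp only [List.map_cons, List.nodup_cons] at hnd
        intro h
        exact hnd.1 (h ▸ List.mem_map_of_mem hq)
      have hb : (q.1 == p.1) = false := beq_eq_false_iff_ne.mpr hqp
      rw [hb, hcont q (List.mem_cons_of_mem _ hq)]
      rfl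
    · simp only [List.map_cons, List.nodup_cons] at hnd
      exact hnd.2

theorem pv_ofList_items {κ ν : Type} [BEq κ] [LawfulBEq κ] (l : List (κ × ν))
    (h : (l.map Prod.fst).Nodup) : (PySem.Dict.ofList l).items = l := by
  unfold PySem.Dict.ofList
  rw [pv_update_items l PySem.Dict.empty (fun p _ => PySem.Dict.contains_empty p.1) h]
  rfl

theorem pvRelabel_items {L : PvL} (hk : L.keys.Nodup) (la lb : Int) :
    (pvRelabel L la lb).items = L.items.map (fun kv => (kv.1, if kv.2 = la then lb else kv.2)) := by
  unfold pvRelabel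
  refine pv_ofList_items _ ?_
  have : (L.items.map (fun kv => (kv.1, if kv.2 = la then lb else kv.2))).map Prod.fst
      = L.items.map Prod.fst := by
    simp [Function.comp]
  rw [this]
  exact hk

theorem pv_find?_map_fst {κ ν₁ ν₂ : Type} [BEq κ] (f : κ × ν₁ → ν₂) (z : κ) :
    ∀ l : List (κ × ν₁),
      (l.map (fun kv => (kv.1, f kv))).find? (fun p => p.1 == z)
      = (l.find? (fun p => p.1 == z)).map (fun kv => (kv.1, f kv)) := by
  intro l
  induction l with
  | nil => rfl
  | cons q t ih =>
    simp only [List.map_cons]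
    by_cases hq : (q.1 == z) = true
    · rw [List.find?_cons_of_pos (by exact hq), List.find?_cons_of_pos (by exact hq)]
      rfl
    · rw [List.find?_cons_of_neg (by simpa using hq), List.find?_cons_of_neg (by simpa using hq)]
      exact ih

theorem pvRelabel_get? {L : PvL} (hk : L.keys.Nodup) (la lb : Int) (z : PvK) :
    (pvRelabel L la lb).get? z = (L.get? z).map (fun v => if v = la then lb else v) := by
  have hitems := pvRelabel_items hk la lb
  show ((pvRelabel L la lb).items.find? (fun p => p.1 == z)).map (fun x => x.2)
      = (L.get? z).map (fun v => if v = la then lb else v)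
  rw [hitems,
    pv_find?_map_fst (fun kv => if kv.2 = la then lb else kv.2) z L.items]
  show _ = ((L.items.find? (fun p => p.1 == z)).map (fun x => x.2)).map
      (fun v => if v = la then lb else v)
  cases hf : L.items.find? (fun p => p.1 == z) <;> rfl

theorem pv_any_map_fst {κ ν₁ ν₂ : Type} [BEq κ] (f : κ × ν₁ → ν₂) (z : κ) :
    ∀ l : List (κ × ν₁),
      (l.map (fun kv => (kv.1, f kv))).any (fun p => p.1 == z) = l.any (fun p => p.1 == z) := by
  intro l
  induction l with
  | nil => rfl
  | cons q t ih => simp only [List.map_cons, List.any_cons, ih]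

theorem pvRelabel_contains {L : PvL} (hk : L.keys.Nodup) (la lb : Int) (z : PvK) :
    (pvRelabel L la lb).contains z = L.contains z := by
  show (pvRelabel L la lb).items.any (fun p => p.1 == z) = L.contains z
  rw [pvRelabel_items hk la lb, pv_any_map_fst]
  rfl

theorem pvRelabel_size {L : PvL} (hk : L.keys.Nodup) (la lb : Int) :
    (pvRelabel L la lb).size = L.size := by
  simp only [PySem.Dict.size, pvRelabel_items hk, List.length_map]

theorem pvRelabel_keys_nodup {L : PvL} (hk : L.keys.Nodup) (la lb : Int) :
    (pvRelabel L la lb).keys.Nodup := by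
  simp only [PySem.Dict.keys, pvRelabel_items hk]
  have : (L.items.map (fun kv => (kv.1, if kv.2 = la then lb else kv.2))).map Prod.fst
      = L.items.map Prod.fst := by simp [Function.comp]
  rw [this]
  exact hk

theorem pvRelabel_fresh {L : PvL} (hk : L.keys.Nodup) (hf : pvLabFresh L)
    {b : PvK} {lb : Int} (hb : L.get? b = some lb) (la : Int) :
    pvLabFresh (pvRelabel L la lb) := by
  intro z v hz
  rw [pvRelabel_get? hk] at hz
  cases hg : L.get? z with
  | none => rw [hg] at hz; cases hz
  | some w =>
    rw [hg] at hz
    obtain rfl : v = if w = la then lb else w := (Option.some.inj hz).symm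
    rw [pvRelabel_size hk]
    by_cases hw : w = la
    · rw [if_pos hw]; exact hf b lb hb
    · rw [if_neg hw]; exact hf z w hg

theorem pvRelabel_labEq {L : PvL} (hk : L.keys.Nodup)
    {a b : PvK} {la lb : Int} (ha : L.get? a = some la) (hb : L.get? b = some lb)
    (hne : la ≠ lb) :
    ∀ x y, pvLabEq (pvRelabel L la lb) x y ↔ pvMerge (pvLabEq L) a b x y := by
  intro x y
  have hrx := pvRelabel_get? hk la lb x
  have hry := pvRelabel_get? hk la lb y
  constructor
  · rintro (rfl | ⟨v, hv1, hv2⟩)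
    · exact Or.inl (Or.inl rfl)
    · rw [hrx] at hv1
      rw [hry] at hv2
      cases hx : L.get? x with
      | none => rw [hx] at hv1; cases hv1
      | some vx =>
        cases hy : L.get? y with
        | none => rw [hy] at hv2; cases hv2
        | some vy =>
          rw [hx] at hv1
          rw [hy] at hv2
          simp only [Option.map_some] at hv1 hv2
          obtain rfl : v = if vx = la then lb else vx := (Option.some.inj hv1).symm
          have hgeq : (if vx = la then lb else vx) = (if vy = la then lb else vy) :=
            (Option.some.inj hv2).symm
          rcases (pv_if_merge la lb vx vy hne).1 hgeq with rfl | ⟨h1, h2⟩ | ⟨h1, h2⟩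
          · exact Or.inl (Or.inr ⟨vx, hx, hy⟩)
          · refine Or.inr (Or.inl ⟨?_, ?_⟩)
            · refine (pvLabEq_iff_get_left ha x).2 ?_
              rw [hx, h1]
            · refine (pvLabEq_iff_get_right hb y).2 ?_
              rw [hy, ← h2]
          · refine Or.inr (Or.inr ⟨?_, ?_⟩)
            · refine (pvLabEq_iff_get_left hb x).2 ?_
              rw [hx, h1]
            · refine (pvLabEq_iff_get_right ha y).2 ?_
              rw [hy, ← h2]
  · rintro (h | ⟨h1, h2⟩ | ⟨h1, h2⟩)
    · rcases h with rfl | ⟨v, hv1, hv2⟩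
      · exact Or.inl rfl
      · refine Or.inr ⟨if v = la then lb else v, ?_, ?_⟩
        · rw [hrx, hv1]; rfl
        · rw [hry, hv2]; rfl
    · have hx := (pvLabEq_iff_get_left ha x).1 h1
      have hy := (pvLabEq_iff_get_right hb y).1 h2
      refine Or.inr ⟨lb, ?_, ?_⟩
      · rw [hrx, hx]; simp
      · rw [hry, hy]
        simp [Ne.symm hne]
    · have hx := (pvLabEq_iff_get_left hb x).1 h1
      have hy := (pvLabEq_iff_get_right ha y).1 h2
      refine Or.inr ⟨lb, ?_, ?_⟩
      · rw [hrx, hx]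
        simp
      · rw [hry, hy]
        simp

-- ===== phase lemmas =====

theorem pvSameRoot_iff_of_isRoot_eq {p p' : PvP}
    (heq : ∀ y s, pvIsRoot p' y s ↔ pvIsRoot p y s) (u v : PvK) :
    pvSameRoot p' u v ↔ pvSameRoot p u v := by
  constructor
  · rintro ⟨r, h1, h2⟩; exact ⟨r, (heq u r).1 h1, (heq v r).1 h2⟩
  · rintro ⟨r, h1, h2⟩; exact ⟨r, (heq u r).2 h1, (heq v r).2 h2⟩

theorem pvInv_empty : pvInv PySem.Dict.empty PySem.Dict.empty 0 := by
  have hroot : ∀ x : PvK, pvReach PySem.Dict.empty x x 0 := fun x =>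
    pvReach.root x (by rw [PySem.Dict.getD_eq_get?_getD, PySem.Dict.get?_empty]; rfl)
  refine ⟨?_, ?_, ?_, ?_, ?_, ?_, ?_⟩
  · intro x; exact ⟨x, 0, hroot x, le_rfl⟩
  · intro x r hx _; rw [PySem.Dict.contains_empty] at hx; cases hx
  · intro x y hx; rw [PySem.Dict.get?_empty] at hx; cases hx
  · intro kk v hk; rw [PySem.Dict.get?_empty] at hk; cases hk
  · simp [PySem.Dict.keys, PySem.Dict.empty]
  · intro z; rw [PySem.Dict.contains_empty, PySem.Dict.contains_empty]
  · intro x y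
    constructor
    · rintro ⟨r, ⟨n1, h1⟩, ⟨n2, h2⟩⟩
      obtain ⟨hrx, -⟩ := pvReach_absent (PySem.Dict.contains_empty x) h1
      obtain ⟨hry, -⟩ := pvReach_absent (PySem.Dict.contains_empty y) h2
      exact Or.inl (hrx.symm.trans hry)
    · rintro (rfl | ⟨v, hv, -⟩)
      · exact ⟨x, ⟨0, hroot x⟩, ⟨0, hroot x⟩⟩
      · rw [PySem.Dict.get?_empty] at hv; cases hv

theorem pvInit_step (fuel k : Nat) (p : PvP) (L : PvL) (x : PvK)
    (h : pvInv p L k) (hf : k < fuel) :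
    pvInv (pvFind fuel p x).1 (pvGetLabel L x).1 k ∧
    (∀ z, (pvFind fuel p x).1.contains z = (p.contains z || z == x)) := by
  obtain ⟨ht, hri, hcl, hfr, hkn, hcn, hiff⟩ := h
  obtain ⟨r, n, hn, hnk⟩ := ht x
  obtain ⟨f2, fmono, fcont, fcl⟩ := pvFind_spec fuel p x r n hn (by omega) hcl
  have heq : ∀ y s, pvIsRoot (pvFind fuel p x).1 y s ↔ pvIsRoot p y s :=
    pvIsRoot_eq_of_mono
      (fun y => by obtain ⟨r', n', hn', -⟩ := ht y; exact ⟨r', n', hn'⟩) fmono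
  refine ⟨⟨?_, ?_, fcl, pvGetLabel_fresh hfr x, pvGetLabel_keys_nodup hkn x, ?_, ?_⟩, fcont⟩
  · intro y
    obtain ⟨r', n', hn', hk'⟩ := ht y
    obtain ⟨m', hm', h'⟩ := fmono y r' n' hn'
    exact ⟨r', m', h', by omega⟩
  · intro y s hy hs
    have hsp : pvIsRoot p y s := (heq y s).1 hs
    rw [fcont] at hy
    rw [fcont]
    by_cases hyp : p.contains y = true
    · rw [hri y s hyp hsp]; rfl
    · have hyf : p.contains y = false := Bool.eq_false_iff.mpr hyp
      rw [hyf] at hy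
      simp only [Bool.false_or] at hy
      obtain ⟨n0, h0⟩ := hsp
      obtain ⟨hsy, -⟩ := pvReach_absent hyf h0
      rw [hsy, hyf, hy]
      rfl
  · intro z; rw [fcont z, pvGetLabel_contains L x z, hcn z]
  · intro u v
    rw [pvSameRoot_iff_of_isRoot_eq heq u v, hiff u v, pvGetLabel_labEq hfr x u v]

theorem pvInit_fold (fuel k : Nat) (xs : List PvK) :
    ∀ (p : PvP) (L : PvL), pvInv p L k → k < fuel →
    pvInv (xs.foldl (fun p x => (pvFind fuel p x).1) p)
          (xs.foldl (fun L x => (pvGetLabel L x).1) L) k ∧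
    (∀ z, p.contains z = true →
      (xs.foldl (fun p x => (pvFind fuel p x).1) p).contains z = true) ∧
    (∀ x ∈ xs, (xs.foldl (fun p x => (pvFind fuel p x).1) p).contains x = true) := by
  induction xs with
  | nil =>
    intro p L h hf
    exact ⟨h, fun z hz => hz, fun x hx => absurd hx (List.not_mem_nil)⟩
  | cons x t ih =>
    intro p L h hf
    obtain ⟨h1, hcont⟩ := pvInit_step fuel k p L x h hf
    obtain ⟨h2, hmono, hall⟩ := ih (pvFind fuel p x).1 (pvGetLabel L x).1 h1 hf
    refine ⟨h2, ?_, ?_⟩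
    · intro z hz
      exact hmono z (by rw [hcont z, hz]; rfl)
    · intro y hy
      rcases List.mem_cons.1 hy with rfl | hy'
      · exact hmono y (by rw [hcont y]; simp)
      · exact hall y hy'

def pvStepB (L : PvL) (a b : PvK) : PvL :=
  let ga := pvGetLabel L a
  let gb := pvGetLabel ga.1 b
  if ga.2 ≠ gb.2 then pvRelabel gb.1 ga.2 gb.2 else gb.1

theorem pvPair_step (fuel k : Nat) (p : PvP) (L : PvL) (a b : PvK)
    (h : pvInv p L k) (hf : k < fuel) :
    pvInv (pvUnion fuel p a b) (pvStepB L a b) (k+1) ∧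
    (∀ z, (pvUnion fuel p a b).contains z = (p.contains z || z == a || z == b)) := by
  obtain ⟨ht, hri, hcl, hfr, hkn, hcn, hiff⟩ := h
  obtain ⟨htu, hriu, hclu, hcontu, hcharu⟩ := pvUnion_spec fuel k p a b ht hri hcl hf
  -- B side facts
  have hfr1 : pvLabFresh (pvGetLabel L a).1 := pvGetLabel_fresh hfr a
  have hkn1 : (pvGetLabel L a).1.keys.Nodup := pvGetLabel_keys_nodup hkn a
  have hfr2 : pvLabFresh (pvGetLabel (pvGetLabel L a).1 b).1 := pvGetLabel_fresh hfr1 b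
  have hkn2 : (pvGetLabel (pvGetLabel L a).1 b).1.keys.Nodup := pvGetLabel_keys_nodup hkn1 b
  have hga : (pvGetLabel (pvGetLabel L a).1 b).1.get? a = some (pvGetLabel L a).2 :=
    pvGetLabel_get?_mono (pvGetLabel_get?_self L a) b
  have hgb : (pvGetLabel (pvGetLabel L a).1 b).1.get? b = some (pvGetLabel (pvGetLabel L a).1 b).2 :=
    pvGetLabel_get?_self (pvGetLabel L a).1 b
  have hlab2 : ∀ u v, pvLabEq (pvGetLabel (pvGetLabel L a).1 b).1 u v ↔ pvLabEq L u v := by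
    intro u v
    rw [pvGetLabel_labEq hfr1 b u v, pvGetLabel_labEq hfr a u v]
  have hcont2 : ∀ z, (pvGetLabel (pvGetLabel L a).1 b).1.contains z
      = (L.contains z || z == a || z == b) := by
    intro z
    rw [pvGetLabel_contains, pvGetLabel_contains]
  by_cases hv : (pvGetLabel L a).2 = (pvGetLabel (pvGetLabel L a).1 b).2
  · have hstep : pvStepB L a b = (pvGetLabel (pvGetLabel L a).1 b).1 := by
      unfold pvStepB
      rw [if_neg (by simp [hv])]
    have hab : pvLabEq L a b := by
      refine (hlab2 a b).1 (Or.inr ⟨(pvGetLabel L a).2, hga, ?_⟩)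
      rw [hgb, hv]
    rw [hstep]
    refine ⟨⟨htu, hriu, hclu, hfr2, hkn2, ?_, ?_⟩, hcontu⟩
    · intro z; rw [hcontu z, hcont2 z, hcn z]
    · intro u v
      rw [hcharu u v, hlab2 u v]
      rw [pvMerge_congr (fun x y => hiff x y) u v]
      exact pvMerge_self_of (R := pvLabEq L) (fun _ _ hh => pvLabEq_symm hh)
        (fun _ _ _ h1 h2 => pvLabEq_trans h1 h2) hab u v
  · have hstep : pvStepB L a b
        = pvRelabel (pvGetLabel (pvGetLabel L a).1 b).1 (pvGetLabel L a).2
            (pvGetLabel (pvGetLabel L a).1 b).2 := by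
      unfold pvStepB
      rw [if_pos (by simp [hv])]
    rw [hstep]
    refine ⟨⟨htu, hriu, hclu, ?_, pvRelabel_keys_nodup hkn2 _ _, ?_, ?_⟩, hcontu⟩
    · exact pvRelabel_fresh hkn2 hfr2 hgb _
    · intro z
      rw [hcontu z, pvRelabel_contains hkn2, hcont2 z, hcn z]
    · intro u v
      rw [hcharu u v, pvRelabel_labEq hkn2 hga hgb hv u v]
      rw [pvMerge_congr (fun x y => hlab2 x y) u v]
      exact pvMerge_congr (fun x y => hiff x y) u v

theorem pvPairs_fold (fuel : Nat) (qs : List (Int × Int × Int × Int)) :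
    ∀ (k : Nat) (p : PvP) (L : PvL), pvInv p L k → k + qs.length < fuel →
    pvInv (qs.foldl (fun p q => pvUnion fuel p (pvKey q.1 q.2.1) (pvKey q.2.2.1 q.2.2.2)) p)
          (qs.foldl (fun L q => pvStepB L (pvKey q.1 q.2.1) (pvKey q.2.2.1 q.2.2.2)) L)
          (k + qs.length) ∧
    (∀ z, p.contains z = true →
      (qs.foldl (fun p q => pvUnion fuel p (pvKey q.1 q.2.1) (pvKey q.2.2.1 q.2.2.2)) p).contains z
        = true) := by
  induction qs with
  | nil => intro k p L h hf; exact ⟨h, fun z hz => hz⟩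
  | cons q t ih =>
    intro k p L h hf
    obtain ⟨h1, hcont⟩ := pvPair_step fuel k p L (pvKey q.1 q.2.1) (pvKey q.2.2.1 q.2.2.2) h (by simp at hf; omega)
    obtain ⟨h2, hmono⟩ := ih (k+1) _ _ h1 (by simp at hf ⊢; omega)
    constructor
    · have harith : k + (q :: t).length = (k + 1) + t.length := by simp; omega
      rw [harith]
      exact h2
    · intro z hz
      exact hmono z (by rw [hcont z, hz]; rfl)

-- ===== collection phase =====

noncomputable def pvRootF (p : PvP) (x : PvK) : PvK :=
  @dite _ (∃ r, pvIsRoot p x r) (Classical.propDecidable _) (fun h => h.choose) (fun _ => x)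

theorem pvRootF_isRoot {p : PvP} {x : PvK} (h : ∃ r, pvIsRoot p x r) :
    pvIsRoot p x (pvRootF p x) := by
  unfold pvRootF
  rw [dif_pos h]
  exact h.choose_spec

theorem pvRootF_eq {p : PvP} {x r : PvK} (hex : ∃ r, pvIsRoot p x r)
    (h : pvIsRoot p x r) : pvRootF p x = r := by
  obtain ⟨n1, h1⟩ := pvRootF_isRoot hex
  obtain ⟨n2, h2⟩ := h
  exact (pvReach_det h1 h2).1

theorem pvCollect (fuel : Nat) (p1 : PvP) (items : List (Int × Int)) :
    ∀ (p : PvP) (g : PySem.Dict PvK PvGrp),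
    pvTotal p (fuel - 1) → pvClosed p → 0 < fuel →
    (∀ x s, pvIsRoot p x s ↔ pvIsRoot p1 x s) →
    (items.foldl (fun (st : PvP × PySem.Dict PvK PvGrp) it =>
        let fr := pvFind fuel st.1 (pvKey it.1 it.2)
        (fr.1, st.2.modify fr.2 [] (fun l => l ++ [it]))) (p, g)).2
    = items.foldl (fun g it =>
        g.modify (pvRootF p1 (pvKey it.1 it.2)) [] (fun l => l ++ [it])) g := by
  induction items with
  | nil => intro p g _ _ _ _; rfl
  | cons it rest ih =>
    intro p g htot hcl hpos heq
    obtain ⟨r, n, hn, hnk⟩ := htot (pvKey it.1 it.2)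
    obtain ⟨f2, fmono, fcont, fcl⟩ :=
      pvFind_spec fuel p (pvKey it.1 it.2) r n hn (by omega) hcl
    have hroot1 : pvIsRoot p1 (pvKey it.1 it.2) r := (heq _ _).1 ⟨n, hn⟩
    have hex : ∃ s, pvIsRoot p1 (pvKey it.1 it.2) s := ⟨r, hroot1⟩
    have hF : (pvFind fuel p (pvKey it.1 it.2)).2 = pvRootF p1 (pvKey it.1 it.2) := by
      rw [f2, pvRootF_eq hex hroot1]
    have heq' : ∀ x s, pvIsRoot (pvFind fuel p (pvKey it.1 it.2)).1 x s ↔ pvIsRoot p1 x s := by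
      intro x s
      rw [pvIsRoot_eq_of_mono
        (fun y => by obtain ⟨r', n', hn', -⟩ := htot y; exact ⟨r', n', hn'⟩) fmono x s]
      exact heq x s
    have htot' : pvTotal (pvFind fuel p (pvKey it.1 it.2)).1 (fuel - 1) := by
      intro y
      obtain ⟨r', n', hn', hk'⟩ := htot y
      obtain ⟨m', hm', h'⟩ := fmono y r' n' hn'
      exact ⟨r', m', h', by omega⟩
    simp only [List.foldl_cons]
    rw [show (let fr := pvFind fuel p (pvKey it.1 it.2)
        ((fr.1, g.modify fr.2 [] (fun l => l ++ [it])) : PvP × PySem.Dict PvK PvGrp))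
      = ((pvFind fuel p (pvKey it.1 it.2)).1,
          g.modify (pvRootF p1 (pvKey it.1 it.2)) [] (fun l => l ++ [it])) from by rw [← hF]]
    exact ih (pvFind fuel p (pvKey it.1 it.2)).1 _ htot' fcl hpos heq'

-- ===== grouping machinery =====

def pvBump (kA : PvK) (kB : Int) (it : Int × Int) :
    List (PvK × Int × PvGrp) → List (PvK × Int × PvGrp)
  | [] => [(kA, kB, [it])]
  | e :: t => if e.1 = kA then (e.1, e.2.1, e.2.2 ++ [it]) :: t else e :: pvBump kA kB it t

theorem pvBump_no {kA : PvK} {kB : Int} {it : Int × Int} :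
    ∀ {es : List (PvK × Int × PvGrp)}, (∀ e ∈ es, e.1 ≠ kA) →
    pvBump kA kB it es = es ++ [(kA, kB, [it])] := by
  intro es
  induction es with
  | nil => intro _; rfl
  | cons e t ihs =>
    intro h
    have he : e.1 ≠ kA := h e (List.mem_cons_self ..)
    simp only [pvBump, if_neg he]
    rw [ihs (fun e' he' => h e' (List.mem_cons_of_mem _ he'))]
    rfl

theorem pvBump_keys {kA : PvK} {kB : Int} {it : Int × Int} :
    ∀ {es : List (PvK × Int × PvGrp)}, ∀ e' ∈ pvBump kA kB it es,
      (e'.1 = kA ∧ e'.2.1 = kB) ∨ ∃ e ∈ es, e'.1 = e.1 ∧ e'.2.1 = e.2.1 := by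
  intro es
  induction es with
  | nil =>
    intro e' he'
    simp only [pvBump, List.mem_singleton] at he'
    subst he'
    exact Or.inl ⟨rfl, rfl⟩
  | cons e t ihs =>
    intro e' he'
    simp only [pvBump] at he'
    by_cases he : e.1 = kA
    · rw [if_pos he] at he'
      rcases List.mem_cons.1 he' with rfl | hmem
      · exact Or.inr ⟨e, List.mem_cons_self .., rfl, rfl⟩
      · exact Or.inr ⟨e', List.mem_cons_of_mem _ hmem, rfl, rfl⟩
    · rw [if_neg he] at he'
      rcases List.mem_cons.1 he' with rfl | hmem
      · exact Or.inr ⟨e', List.mem_cons_self .., rfl, rfl⟩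
      · rcases ihs e' hmem with h | ⟨e0, he0, h1, h2⟩
        · exact Or.inl h
        · exact Or.inr ⟨e0, List.mem_cons_of_mem _ he0, h1, h2⟩

theorem pvBump_maps_of_match {kA : PvK} {kB : Int} {it : Int × Int} :
    ∀ {es : List (PvK × Int × PvGrp)}, (∃ e ∈ es, e.1 = kA) →
      (pvBump kA kB it es).map (fun e => e.1) = es.map (fun e => e.1) ∧
      (pvBump kA kB it es).map (fun e => e.2.1) = es.map (fun e => e.2.1) := by
  intro es
  induction es with
  | nil => rintro ⟨e, he, -⟩; exact absurd he (List.not_mem_nil)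
  | cons e t ihs =>
    rintro ⟨e0, he0, h0⟩
    simp only [pvBump]
    by_cases he : e.1 = kA
    · rw [if_pos he]
      constructor <;> simp
    · rw [if_neg he]
      have hmem : ∃ e' ∈ t, e'.1 = kA := by
        rcases List.mem_cons.1 he0 with rfl | hm
        · exact absurd h0 he
        · exact ⟨e0, hm, h0⟩
      refine ⟨?_, ?_⟩
      · simp only [List.map_cons]
        rw [(ihs hmem).1]
      · simp only [List.map_cons]
        rw [(ihs hmem).2]

theorem pvDict_modify_cons_ne {κ ν : Type} [BEq κ] (q : κ × ν) (l : List (κ × ν))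
    (k : κ) (d : ν) (f : ν → ν) (hq : (q.1 == k) = false) :
    (PySem.Dict.mk (q :: l)).modify k d f
      = PySem.Dict.mk (q :: ((PySem.Dict.mk l).modify k d f).items) := by
  have hget : (PySem.Dict.mk (q :: l)).get? k = (PySem.Dict.mk l).get? k := by
    show (List.find? (fun p => p.1 == k) (q :: l)).map (fun x => x.2)
        = (List.find? (fun p => p.1 == k) l).map (fun x => x.2)
    rw [List.find?_cons_of_neg (by simp [hq])]
  have hcont : (PySem.Dict.mk (q :: l)).contains k = (PySem.Dict.mk l).contains k := by
    show List.any (q :: l) (fun p => p.1 == k) = List.any l (fun p => p.1 == k)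
    simp [hq]
  simp only [PySem.Dict.modify, PySem.Dict.getD_eq_get?_getD, hget]
  generalize f (((PySem.Dict.mk l).get? k).getD d) = v
  by_cases hc : (PySem.Dict.mk l).contains k = true
  · have hc2 : (PySem.Dict.mk (q :: l)).contains k = true := by rw [hcont]; exact hc
    simp only [PySem.Dict.insert, hc, hc2, if_true]
    show PySem.Dict.mk ((q :: l).map (fun p => if (p.1 == k) = true then (k, v) else p))
        = PySem.Dict.mk (q :: l.map (fun p => if (p.1 == k) = true then (k, v) else p))
    rw [List.map_cons, if_neg (by simp [hq])]
  · have hc1 : (PySem.Dict.mk l).contains k = false := Bool.eq_false_iff.mpr hc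
    have hc2 : (PySem.Dict.mk (q :: l)).contains k = false := by rw [hcont]; exact hc1
    simp only [PySem.Dict.insert, hc1, hc2, Bool.false_eq_true, if_false]
    rfl

theorem pvDict_modify_cons_eq {κ ν : Type} [BEq κ] (q : κ × ν) (l : List (κ × ν))
    (k : κ) (d : ν) (f : ν → ν) (hq : (q.1 == k) = true)
    (hl : ∀ q' ∈ l, (q'.1 == k) = false) :
    (PySem.Dict.mk (q :: l)).modify k d f = PySem.Dict.mk ((k, f q.2) :: l) := by
  have hget : (PySem.Dict.mk (q :: l)).get? k = some q.2 := by
    show (List.find? (fun p => p.1 == k) (q :: l)).map (fun x => x.2) = some q.2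
    rw [List.find?_cons_of_pos (by simp [hq])]
    rfl
  have hcont : (PySem.Dict.mk (q :: l)).contains k = true := by
    show List.any (q :: l) (fun p => p.1 == k) = true
    simp [hq]
  simp only [PySem.Dict.modify, PySem.Dict.getD_eq_get?_getD, hget]
  simp only [PySem.Dict.insert, hcont, if_true]
  show PySem.Dict.mk ((q :: l).map
      (fun p => if (p.1 == k) = true then (k, f ((some q.2).getD d)) else p))
      = PySem.Dict.mk ((k, f q.2) :: l)
  have htail : l.map (fun p => if (p.1 == k) = true then (k, f ((some q.2).getD d)) else p) = l := by
    conv_rhs => rw [← List.map_id l]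
    refine List.map_congr_left ?_
    intro p hp
    rw [hl p hp]
    simp
  rw [List.map_cons, if_pos hq, htail]
  rfl

theorem pvModify_bumpA (es : List (PvK × Int × PvGrp)) (kA : PvK) (kB : Int)
    (it : Int × Int) (hnd : (es.map (fun e => e.1)).Nodup) :
    (PySem.Dict.mk (es.map (fun e => (e.1, e.2.2)))).modify kA [] (fun l => l ++ [it])
      = PySem.Dict.mk ((pvBump kA kB it es).map (fun e => (e.1, e.2.2))) := by
  induction es with
  | nil => rfl
  | cons e t ih =>
    simp only [List.map_cons, List.nodup_cons] at hnd
    obtain ⟨hnotin, hndt⟩ := hnd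
    by_cases he : e.1 = kA
    · have htail : ∀ q' ∈ t.map (fun e => (e.1, e.2.2)), (q'.1 == kA) = false := by
        rintro q' hq'
        obtain ⟨e', he', rfl⟩ := List.mem_map.1 hq'
        refine beq_eq_false_iff_ne.mpr ?_
        intro hcontra
        exact hnotin (he ▸ hcontra ▸ List.mem_map_of_mem he')
      rw [List.map_cons,
        pvDict_modify_cons_eq (e.1, e.2.2) (t.map (fun e => (e.1, e.2.2))) kA []
          (fun l => l ++ [it]) (by simp [he]) htail]
      simp only [pvBump, if_pos he, List.map_cons]
      rw [he]
    · rw [List.map_cons,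
        pvDict_modify_cons_ne (e.1, e.2.2) (t.map (fun e => (e.1, e.2.2))) kA []
          (fun l => l ++ [it]) (by simp [he]), ih hndt]
      simp only [pvBump, if_neg he, List.map_cons]

theorem pvModify_bumpB (es : List (PvK × Int × PvGrp)) (kA : PvK) (kB : Int)
    (it : Int × Int) (hnd : (es.map (fun e => e.2.1)).Nodup)
    (hal : ∀ e ∈ es, (e.1 = kA ↔ e.2.1 = kB)) :
    (PySem.Dict.mk (es.map (fun e => (e.2.1, e.2.2)))).modify kB [] (fun l => l ++ [it])
      = PySem.Dict.mk ((pvBump kA kB it es).map (fun e => (e.2.1, e.2.2))) := by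
  induction es with
  | nil => rfl
  | cons e t ih =>
    simp only [List.map_cons, List.nodup_cons] at hnd
    obtain ⟨hnotin, hndt⟩ := hnd
    have hale := hal e (List.mem_cons_self ..)
    by_cases he : e.1 = kA
    · have heB : e.2.1 = kB := hale.1 he
      have htail : ∀ q' ∈ t.map (fun e => (e.2.1, e.2.2)), (q'.1 == kB) = false := by
        rintro q' hq'
        obtain ⟨e', he', rfl⟩ := List.mem_map.1 hq'
        refine beq_eq_false_iff_ne.mpr ?_
        intro hcontra
        exact hnotin (heB ▸ hcontra ▸ List.mem_map_of_mem he')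
      rw [List.map_cons,
        pvDict_modify_cons_eq (e.2.1, e.2.2) (t.map (fun e => (e.2.1, e.2.2))) kB []
          (fun l => l ++ [it]) (by simp [heB]) htail]
      simp only [pvBump, if_pos he, List.map_cons]
      rw [heB]
    · have heB : e.2.1 ≠ kB := fun hcontra => he (hale.2 hcontra)
      rw [List.map_cons,
        pvDict_modify_cons_ne (e.2.1, e.2.2) (t.map (fun e => (e.2.1, e.2.2))) kB []
          (fun l => l ++ [it]) (by simp [heB]),
        ih hndt (fun e' he' => hal e' (List.mem_cons_of_mem _ he'))]
      simp only [pvBump, if_neg he, List.map_cons]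

theorem pvGroupFold_values (F : PvK → PvK) (G : PvK → Int) (items0 : List (Int × Int))
    (hiff : ∀ i ∈ items0, ∀ j ∈ items0,
      (F (pvKey i.1 i.2) = F (pvKey j.1 j.2)) ↔ (G (pvKey i.1 i.2) = G (pvKey j.1 j.2))) :
    ∀ (items : List (Int × Int)) (es : List (PvK × Int × PvGrp)),
      (∀ i ∈ items, i ∈ items0) →
      (∀ e ∈ es, ∃ i0 ∈ items0, e.1 = F (pvKey i0.1 i0.2) ∧ e.2.1 = G (pvKey i0.1 i0.2)) →
      (es.map (fun e => e.1)).Nodup → (es.map (fun e => e.2.1)).Nodup →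
      (items.foldl (fun g it => g.modify (F (pvKey it.1 it.2)) [] (fun l => l ++ [it]))
        (PySem.Dict.mk (es.map (fun e => (e.1, e.2.2))))).values
      = (items.foldl (fun g it => g.modify (G (pvKey it.1 it.2)) [] (fun l => l ++ [it]))
        (PySem.Dict.mk (es.map (fun e => (e.2.1, e.2.2))))).values := by
  intro items
  induction items with
  | nil =>
    intro es _ _ _ _
    show (es.map (fun e => (e.1, e.2.2))).map (fun x => x.2)
        = (es.map (fun e => (e.2.1, e.2.2))).map (fun x => x.2)
    simp
  | cons it rest ih =>
    intro es hsub hreps hndA hndB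
    have hit0 : it ∈ items0 := hsub it (List.mem_cons_self ..)
    have hal : ∀ e ∈ es, (e.1 = F (pvKey it.1 it.2) ↔ e.2.1 = G (pvKey it.1 it.2)) := by
      intro e he
      obtain ⟨i0, hi0, h1, h2⟩ := hreps e he
      rw [h1, h2]
      exact hiff i0 hi0 it hit0
    simp only [List.foldl_cons]
    rw [pvModify_bumpA es (F (pvKey it.1 it.2)) (G (pvKey it.1 it.2)) it hndA,
      pvModify_bumpB es (F (pvKey it.1 it.2)) (G (pvKey it.1 it.2)) it hndB hal]
    refine ih (pvBump (F (pvKey it.1 it.2)) (G (pvKey it.1 it.2)) it es)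
      (fun i hi => hsub i (List.mem_cons_of_mem _ hi)) ?_ ?_ ?_
    · intro e' he'
      rcases pvBump_keys e' he' with ⟨h1, h2⟩ | ⟨e, he, h1, h2⟩
      · exact ⟨it, hit0, h1, h2⟩
      · obtain ⟨i0, hi0, g1, g2⟩ := hreps e he
        exact ⟨i0, hi0, h1.trans g1, h2.trans g2⟩
    · by_cases hm : ∃ e ∈ es, e.1 = F (pvKey it.1 it.2)
      · rw [(pvBump_maps_of_match hm).1]; exact hndA
      · simp only [not_exists, not_and] at hm
        rw [pvBump_no hm]
        simp only [List.map_append, List.map_cons, List.map_nil]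
        rw [List.nodup_append]
        refine ⟨hndA, List.nodup_singleton _, ?_⟩
        intro x hx y hy
        obtain ⟨e, he, rfl⟩ := List.mem_map.1 hx
        rw [List.mem_singleton] at hy
        subst hy
        exact hm e he
    · by_cases hm : ∃ e ∈ es, e.1 = F (pvKey it.1 it.2)
      · rw [(pvBump_maps_of_match hm).2]; exact hndB
      · simp only [not_exists, not_and] at hm
        rw [pvBump_no hm]
        simp only [List.map_append, List.map_cons, List.map_nil]
        rw [List.nodup_append]
        refine ⟨hndB, List.nodup_singleton _, ?_⟩
        intro x hx y hy
        obtain ⟨e, he, rfl⟩ := List.mem_map.1 hx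
        rw [List.mem_singleton] at hy
        subst hy
        intro hcontra
        exact hm e he ((hal e he).2 hcontra)

theorem pvNested_eq {σ : Type} (afs : List (List (Int × Int))) (f : σ → (Int × Int) → σ) (i : σ) :
    (PySem.List.enumerate afs).foldl (fun acc fs =>
      ((PySem.Dict.ofList fs.2).keys).foldl (fun acc sid => f acc (fs.1, sid)) acc) i
    = (pvItemsOf afs).foldl f i := by
  rw [pvItemsOf, pv_foldl_flatMap]
  refine PySem.List.foldl_congr_mem _ _ _ _ ?_
  intro acc fs _
  exact List.foldl_map.symm

-- ===== VERDICT (by name: the statement is the Claim_ definition above) =====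
theorem pv_foldl_keyed {σ : Type} (items : List (Int × Int)) (f : σ → PvK → σ) (i : σ) :
    items.foldl (fun acc it => f acc (pvKey it.1 it.2)) i
      = (items.map (fun it => pvKey it.1 it.2)).foldl f i :=
  List.foldl_map.symm

theorem build_global_segments_greedy_spec : Claim_equal_build_global_segments_greedy := by
  intro afs cps _hdom
  unfold Spec_build_global_segments_greedy
  -- flatten the nested frame/segment loops of both ports
  have e1 : (PySem.List.enumerate afs).foldl (fun p fs =>
        ((PySem.Dict.ofList fs.2).keys).foldl
          (fun p sid => (pvFind (cps.length + 1) p (pvKey fs.1 sid)).1) p) PySem.Dict.empty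
      = (pvItemsOf afs).foldl
          (fun p it => (pvFind (cps.length + 1) p (pvKey it.1 it.2)).1) PySem.Dict.empty :=
    pvNested_eq afs (fun p it => (pvFind (cps.length + 1) p (pvKey it.1 it.2)).1) _
  have e2 : (PySem.List.enumerate afs).foldl (fun L fs =>
        ((PySem.Dict.ofList fs.2).keys).foldl
          (fun L sid => (pvGetLabel L (pvKey fs.1 sid)).1) L) PySem.Dict.empty
      = (pvItemsOf afs).foldl
          (fun L it => (pvGetLabel L (pvKey it.1 it.2)).1) PySem.Dict.empty :=
    pvNested_eq afs (fun L it => (pvGetLabel L (pvKey it.1 it.2)).1) _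
  -- names for the two states after the union phase
  have hp0eq : (pvItemsOf afs).foldl
        (fun p it => (pvFind (cps.length + 1) p (pvKey it.1 it.2)).1) PySem.Dict.empty
      = ((pvItemsOf afs).map (fun it => pvKey it.1 it.2)).foldl
          (fun p x => (pvFind (cps.length + 1) p x).1) PySem.Dict.empty :=
    pv_foldl_keyed (pvItemsOf afs) (fun p x => (pvFind (cps.length + 1) p x).1) PySem.Dict.empty
  have hL0eq : (pvItemsOf afs).foldl
        (fun L it => (pvGetLabel L (pvKey it.1 it.2)).1) PySem.Dict.empty
      = ((pvItemsOf afs).map (fun it => pvKey it.1 it.2)).foldl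
          (fun L x => (pvGetLabel L x).1) PySem.Dict.empty :=
    pv_foldl_keyed (pvItemsOf afs) (fun L x => (pvGetLabel L x).1) PySem.Dict.empty
  obtain ⟨hInv0, hmono0, hall0⟩ :=
    pvInit_fold (cps.length + 1) 0 ((pvItemsOf afs).map (fun it => pvKey it.1 it.2))
      PySem.Dict.empty PySem.Dict.empty pvInv_empty (by omega)
  obtain ⟨hInv1, hmono1⟩ :=
    pvPairs_fold (cps.length + 1) cps 0 _ _ hInv0 (by omega)
  -- the union-phase results
  set p1 := cps.foldl
      (fun p q => pvUnion (cps.length + 1) p (pvKey q.1 q.2.1) (pvKey q.2.2.1 q.2.2.2))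
      (((pvItemsOf afs).map (fun it => pvKey it.1 it.2)).foldl
        (fun p x => (pvFind (cps.length + 1) p x).1) PySem.Dict.empty) with hp1def
  set L1 := cps.foldl
      (fun L q => pvStepB L (pvKey q.1 q.2.1) (pvKey q.2.2.1 q.2.2.2))
      (((pvItemsOf afs).map (fun it => pvKey it.1 it.2)).foldl
        (fun L x => (pvGetLabel L x).1) PySem.Dict.empty) with hL1def
  obtain ⟨ht1, hri1, hcl1, hfr1, hkn1, hcn1, hiff1⟩ := hInv1
  have hexk : ∀ x, ∃ r, pvIsRoot p1 x r := by
    intro x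
    obtain ⟨r, n, hn, -⟩ := ht1 x
    exact ⟨r, n, hn⟩
  have hkeys : ∀ x ∈ (pvItemsOf afs).map (fun it => pvKey it.1 it.2),
      p1.contains x = true := fun x hx => hmono1 x (hall0 x hx)
  -- the two labelling functions agree as partitions on the scanned items
  have hGiff : ∀ i ∈ pvItemsOf afs, ∀ j ∈ pvItemsOf afs,
      (pvRootF p1 (pvKey i.1 i.2) = pvRootF p1 (pvKey j.1 j.2)) ↔
      (L1.getD (pvKey i.1 i.2) 0 = L1.getD (pvKey j.1 j.2) 0) := by
    intro i hi j hj
    have hki : p1.contains (pvKey i.1 i.2) = true :=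
      hkeys _ (List.mem_map.2 ⟨i, hi, rfl⟩)
    have hkj : p1.contains (pvKey j.1 j.2) = true :=
      hkeys _ (List.mem_map.2 ⟨j, hj, rfl⟩)
    constructor
    · intro hFeq
      have h1 := pvRootF_isRoot (hexk (pvKey i.1 i.2))
      have h2 := pvRootF_isRoot (hexk (pvKey j.1 j.2))
      have hsr : pvSameRoot p1 (pvKey i.1 i.2) (pvKey j.1 j.2) := ⟨_, h1, hFeq ▸ h2⟩
      rcases (hiff1 _ _).1 hsr with heq' | ⟨v, hv1, hv2⟩
      · rw [heq']
      · rw [PySem.Dict.getD_eq_get?_getD, PySem.Dict.getD_eq_get?_getD, hv1, hv2]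
    · intro hGeq
      have hg1 : L1.get? (pvKey i.1 i.2) = some (L1.getD (pvKey i.1 i.2) 0) :=
        pv_get?_of_containsL (by rw [← hcn1]; exact hki) 0
      have hg2 : L1.get? (pvKey j.1 j.2) = some (L1.getD (pvKey j.1 j.2) 0) :=
        pv_get?_of_containsL (by rw [← hcn1]; exact hkj) 0
      have hle : pvLabEq L1 (pvKey i.1 i.2) (pvKey j.1 j.2) :=
        Or.inr ⟨L1.getD (pvKey i.1 i.2) 0, hg1, by rw [hGeq]; exact hg2⟩
      obtain ⟨r, hr1, hr2⟩ := (hiff1 _ _).2 hle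
      rw [pvRootF_eq (hexk _) hr1, pvRootF_eq (hexk _) hr2]
  -- collection phase of A reduced to a pure group-by fold
  have e3 : (PySem.List.enumerate afs).foldl (fun st fs =>
        ((PySem.Dict.ofList fs.2).keys).foldl
          (fun (st : PvP × PySem.Dict PvK PvGrp) sid =>
            let fr := pvFind (cps.length + 1) st.1 (pvKey fs.1 sid)
            (fr.1, st.2.modify fr.2 [] (fun l => l ++ [(fs.1, sid)]))) st)
        ((p1, PySem.Dict.empty) : PvP × PySem.Dict PvK PvGrp)
      = (pvItemsOf afs).foldl
          (fun (st : PvP × PySem.Dict PvK PvGrp) it =>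
            let fr := pvFind (cps.length + 1) st.1 (pvKey it.1 it.2)
            (fr.1, st.2.modify fr.2 [] (fun l => l ++ [it])))
          ((p1, PySem.Dict.empty) : PvP × PySem.Dict PvK PvGrp) :=
    pvNested_eq afs (fun (st : PvP × PySem.Dict PvK PvGrp) it =>
      let fr := pvFind (cps.length + 1) st.1 (pvKey it.1 it.2)
      (fr.1, st.2.modify fr.2 [] (fun l => l ++ [it]))) _
  have e4 : (PySem.List.enumerate afs).foldl (fun g fs =>
        ((PySem.Dict.ofList fs.2).keys).foldl
          (fun (g : PySem.Dict Int PvGrp) sid =>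
            g.modify (L1.getD (pvKey fs.1 sid) 0) [] (fun l => l ++ [(fs.1, sid)])) g)
        (PySem.Dict.empty : PySem.Dict Int PvGrp)
      = (pvItemsOf afs).foldl
          (fun (g : PySem.Dict Int PvGrp) it =>
            g.modify (L1.getD (pvKey it.1 it.2) 0) [] (fun l => l ++ [it]))
          (PySem.Dict.empty : PySem.Dict Int PvGrp) :=
    pvNested_eq afs (fun (g : PySem.Dict Int PvGrp) it =>
      g.modify (L1.getD (pvKey it.1 it.2) 0) [] (fun l => l ++ [it])) _
  have htotP : pvTotal p1 ((cps.length + 1) - 1) := by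
    have := ht1
    simpa using this
  have hcollect := pvCollect (cps.length + 1) p1 (pvItemsOf afs) p1 PySem.Dict.empty
    htotP hcl1 (by omega) (fun x s => Iff.rfl)
  have hvals := pvGroupFold_values (pvRootF p1) (fun kk => L1.getD kk 0) (pvItemsOf afs)
    hGiff (pvItemsOf afs) [] (fun i hi => hi)
    (by intro e he; exact absurd he (List.not_mem_nil))
    (by simp) (by simp)
  -- assemble
  show build_global_segments_greedy afs cps = build_global_segments_greedy_alt afs cps
  unfold build_global_segments_greedy build_global_segments_greedy_alt
  simp only []
  rw [e1, e2, hp0eq, hL0eq]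
  rw [show (fun (L : PvL) q =>
      let ga := pvGetLabel L (pvKey q.1 q.2.1)
      let gb := pvGetLabel ga.1 (pvKey q.2.2.1 q.2.2.2)
      if ga.2 ≠ gb.2 then
        PySem.Dict.ofList (gb.1.items.map (fun kv => (kv.1, if kv.2 = ga.2 then gb.2 else kv.2)))
      else gb.1)
    = (fun (L : PvL) (q : Int × Int × Int × Int) =>
        pvStepB L (pvKey q.1 q.2.1) (pvKey q.2.2.1 q.2.2.2)) from rfl]
  rw [← hp1def, ← hL1def]
  rw [e3, e4]
  rw [hcollect]
  exact congrArg PySem.List.enumerate hvals
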